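-- pv_equiv track=rewrite | github.com/ayang923/CS134 | sixdof/sixdof/gamenode.py | range_middle_out
-- ===== SOURCE A (Python) =====
-- def range_middle_out(start, stop, step=1):
--     """
--     Generates a list of integers similar to range() but starts from the middle and works outwards.
--
--     Args:
--         start (int): The starting value of the range.
--         stop (int): The ending value of the range.
--         step (int, optional): The step between each pair of consecutive values. Default is 1.
--
--     Returns:
--         list: A list of integers starting from the middle and working outwards.
--     """
--     middle = (start + stop) // 2  # Calculate the middle value
--
--     # Generate the list from the middle value, working outwards
--     result = []
--     for i in range(0, middle - start + 1, step):
--         result.append(middle + i)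
--         if middle - i != middle + i:
--             result.append(middle - i)
--
--     return result
-- ===== SOURCE B (Python) =====
-- def range_middle_out(start, stop, step=1):
--     middle = (start + stop) // 2
--     up = [middle + i for i in range(0, middle - start + 1, step)]
--     down = [2 * middle - x for x in up]
--     return up[:1] + [v for pair in zip(up[1:], down[1:]) for v in pair]
-- ===== Notes on version B (the rewrite author's own statement) =====
-- stated objective: alternative
-- what changed: B builds the upward offsets as one comprehension, derives the mirrored downward values by mapping 2*middle - x over it, and produces the result as up[:1] plus a zip-interleave of up[1:] with down[1:], instead of A's single loop that appends one or two elements per iteration with an i==0 test.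
import Mathlib
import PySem

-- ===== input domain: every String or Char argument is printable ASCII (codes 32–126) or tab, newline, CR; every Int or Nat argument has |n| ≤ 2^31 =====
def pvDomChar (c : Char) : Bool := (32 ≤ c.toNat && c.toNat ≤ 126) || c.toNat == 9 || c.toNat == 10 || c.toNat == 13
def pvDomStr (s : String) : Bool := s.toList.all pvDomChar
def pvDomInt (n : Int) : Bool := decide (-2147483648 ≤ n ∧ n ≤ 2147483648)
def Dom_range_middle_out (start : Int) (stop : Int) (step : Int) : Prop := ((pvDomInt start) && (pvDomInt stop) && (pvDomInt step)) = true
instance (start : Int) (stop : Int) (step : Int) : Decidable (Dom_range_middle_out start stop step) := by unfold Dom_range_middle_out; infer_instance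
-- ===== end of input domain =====

-- B builds the upward and downward arithmetic sequences as two comprehensions and
-- interleaves them with zip instead of A's single append-two-per-iteration loop
-- (alternative decomposition, same cost).

-- ===== PORT A =====
def range_middle_out (start : Int) (stop : Int) (step : Int) : List Int :=
  let middle := PySem.Int.floordiv (start + stop) 2
  (PySem.List.pyRange 0 (middle - start + 1) step).foldl
    (fun result i =>
      let result := result ++ [middle + i]
      if middle - i ≠ middle + i then result ++ [middle - i] else result) []

-- ===== PORT B =====
def range_middle_out_alt (start : Int) (stop : Int) (step : Int) : List Int :=
  let middle := PySem.Int.floordiv (start + stop) 2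
  let up := (PySem.List.pyRange 0 (middle - start + 1) step).map (fun i => middle + i)
  let down := up.map (fun x => 2 * middle - x)
  PySem.List.slice up none (some 1) ++
    ((PySem.List.slice up (some 1) none).zip (PySem.List.slice down (some 1) none)).flatMap
      (fun p => [p.1, p.2])

-- ===== PRECONDITION & SPEC =====
-- Python's range raises ValueError when step == 0 (in both A and B); excluded.
def Pre_range_middle_out (start : Int) (stop : Int) (step : Int) : Prop := step ≠ 0
instance (start : Int) (stop : Int) (step : Int) : Decidable (Pre_range_middle_out start stop step) := by unfold Pre_range_middle_out; infer_instance

def pvWitness_range_middle_out : Int × Int × Int := (0, 10, 1)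

def Spec_range_middle_out (start : Int) (stop : Int) (step : Int) (out : List Int) : Prop := out = range_middle_out_alt start stop step
instance (start : Int) (stop : Int) (step : Int) (out : List Int) : Decidable (Spec_range_middle_out start stop step out) := by unfold Spec_range_middle_out; infer_instance

-- ===== CLAIM (what is proved, stated in full; the proofs are below) =====
def Claim_equal_range_middle_out : Prop := ∀ (start : Int) (stop : Int) (step : Int), Dom_range_middle_out start stop step → Pre_range_middle_out start stop step → Spec_range_middle_out start stop step (range_middle_out start stop step)

-- ===== LEMMAS AND PROOFS =====

-- A's loop over a list of nonzero offsets emits the pair [m+i, m-i] for each offset.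
lemma fold_pairs (m : Int) :
    ∀ (l : List Int) (acc : List Int), (∀ i ∈ l, i ≠ 0) →
      l.foldl (fun result i =>
        let result := result ++ [m + i]
        if m - i ≠ m + i then result ++ [m - i] else result) acc
      = acc ++ l.flatMap (fun i => [m + i, m - i]) := by
  intro l
  induction l with
  | nil => intro acc _; simp
  | cons i l ih =>
    intro acc h
    have hi : i ≠ 0 := h i (by simp)
    have hc : m - i ≠ m + i := by omega
    simp only [List.foldl_cons, List.flatMap_cons, if_pos hc]
    rw [ih _ (fun j hj => h j (by simp [hj]))]
    simp

-- pyRange 0 n step (step ≠ 0) is the map of k ↦ step*k over an initial segment.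
lemma pyRange_zero_eq (n step : Int) (hs : step ≠ 0) :
    ∃ c : Nat, PySem.List.pyRange 0 n step = List.map (fun k : Nat => step * (k : Int)) (List.range c) := by
  refine ⟨if 0 < step then (if (0:Int) < n then ((n - 0 + step - 1) / step).toNat else 0)
    else (if n < 0 then ((0 - n + -step - 1) / -step).toNat else 0), ?_⟩
  simp only [PySem.List.pyRange, if_neg hs, zero_add]

theorem range_middle_out_spec : Claim_equal_range_middle_out := by
  intro start stop step _ hs
  unfold Spec_range_middle_out range_middle_out range_middle_out_alt
  simp only []
  set m := PySem.Int.floordiv (start + stop) 2 with hm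
  obtain ⟨c, hL⟩ := pyRange_zero_eq (m - start + 1) step hs
  rw [hL]
  rw [PySem.List.slice_to _ (by omega : (0:Int) ≤ 1),
      PySem.List.slice_from _ (by omega : (0:Int) ≤ 1),
      PySem.List.slice_from _ (by omega : (0:Int) ≤ 1)]
  cases c with
  | zero => simp
  | succ c' =>
    rw [List.range_succ_eq_map]
    simp only [List.map_cons, List.map_map, Nat.cast_zero, mul_zero, List.foldl_cons,
      add_zero, sub_zero, ne_eq, not_true_eq_false, if_false]
    have hnz : ∀ i ∈ (List.range c').map ((fun k : Nat => step * (k : Int)) ∘ Nat.succ),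
        i ≠ 0 := by
      intro i hi
      simp only [List.mem_map, Function.comp] at hi
      obtain ⟨k, -, rfl⟩ := hi
      exact mul_ne_zero hs (by exact_mod_cast k.succ_ne_zero)
    rw [fold_pairs m _ _ hnz]
    rw [show Int.toNat 1 = 1 from rfl]
    simp only [List.take_succ_cons, List.take_zero, List.drop_succ_cons, List.drop_zero,
      List.nil_append]
    rw [List.zip_map']
    simp only [List.flatMap_map]
    congr 1
    apply congrArg (fun f => List.flatMap f (List.range c'))
    funext a
    simp only [Function.comp]
    have : m - step * ((a.succ : Nat) : Int) = 2 * m - (m + step * ((a.succ : Nat) : Int)) := by ring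
    rw [this]
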